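-- pv_equiv track=rewrite | github.com/fearlessronin/ai-dev | cve_agent/corroboration_patch_context.py | _regional_escalation_badges
-- ===== SOURCE A (Python) =====
-- VENDOR_SOURCES = {
--     "msrc",
--     "red hat security data api",
--     "debian security tracker",
--     "ubuntu security notices",
--     "suse security advisories",
--     "oracle critical patch update",
--     "cisco security advisories",
--     "palo alto networks security advisories",
--     "fortinet psirt advisories",
--     "vmware/broadcom security advisories",
--     "apple security updates",
--     "google android security bulletins",
-- }
--
-- def _norm(value: str) -> str:
--     return " ".join(str(value or "").strip().lower().split())
--
-- def _is_national_source(source: str) -> bool: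
--     s = _norm(source)
--     if s in VENDOR_SOURCES:
--         return False
--     keywords = (
--         "cisa",
--         "cert-fr",
--         "bsi",
--         "cert-bund",
--         "jvn",
--         "ncsc",
--         "govcert",
--         "hkcert",
--         "cert-eu",
--         "cert/cc",
--     )
--     return any(k in s for k in keywords)
--
-- def _regional_escalation_badges(regional_sources: list[str]) -> list[str]:
--     normalized = {_norm(s): str(s) for s in regional_sources}
--     keys = set(normalized)
--
--     cisa = any("cisa" in k for k in keys)
--     cert_fr = any("cert-fr" in k for k in keys)
--     bsi = any("bsi" in k or "cert-bund" in k for k in keys)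
--     eu = cert_fr or bsi or any("cert-eu" in k or "ncsc" in k for k in keys)
--     national_count = sum(1 for k in keys if _is_national_source(k))
--
--     badges: list[str] = []
--     if national_count >= 2:
--         badges.append("multi-national-corroboration")
--     if national_count >= 3:
--         badges.append("regional-burst")
--     if cisa and eu:
--         badges.append("transatlantic-escalation")
--     if cisa and cert_fr:
--         badges.append("CISA+CERT-FR")
--     if cisa and bsi:
--         badges.append("CISA+BSI")
--     if cert_fr and bsi:
--         badges.append("CERT-FR+BSI")
--     return sorted(set(badges))
-- ===== SOURCE B (Python) =====
-- VENDOR_SOURCES = {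
--     "msrc",
--     "red hat security data api",
--     "debian security tracker",
--     "ubuntu security notices",
--     "suse security advisories",
--     "oracle critical patch update",
--     "cisco security advisories",
--     "palo alto networks security advisories",
--     "fortinet psirt advisories",
--     "vmware/broadcom security advisories",
--     "apple security updates",
--     "google android security bulletins",
-- }
--
-- _NATIONAL_KEYWORDS = (
--     "cisa",
--     "cert-fr",
--     "bsi",
--     "cert-bund",
--     "jvn",
--     "ncsc",
--     "govcert",
--     "hkcert",
--     "cert-eu",
--     "cert/cc",
-- )
--
--
-- def _norm(value: str) -> str:
--     return " ".join(str(value or "").strip().lower().split())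
--
--
-- def _is_national_source(source: str) -> bool:
--     s = _norm(source)
--     if s in VENDOR_SOURCES:
--         return False
--     return any(k in s for k in _NATIONAL_KEYWORDS)
--
--
-- def _key_tags(k: str) -> list[str]:
--     """Classify one normalized key into abstract escalation tags."""
--     tags = []
--     if "cisa" in k:
--         tags.append("cisa")
--     if "cert-fr" in k:
--         tags.append("cert-fr")
--     if "bsi" in k or "cert-bund" in k:
--         tags.append("bsi")
--     if "cert-eu" in k or "ncsc" in k:
--         tags.append("eu-partner")
--     if _is_national_source(k):
--         tags.append("national")
--     return tags
--
--
-- # Badge rules over the tag multiset, listed in the output's sorted order,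
-- # so the result is produced by filtering the table -- no sort, no set of badges.
-- _BADGE_RULES = (
--     ("CERT-FR+BSI", lambda t, n: "cert-fr" in t and "bsi" in t),
--     ("CISA+BSI", lambda t, n: "cisa" in t and "bsi" in t),
--     ("CISA+CERT-FR", lambda t, n: "cisa" in t and "cert-fr" in t),
--     ("multi-national-corroboration", lambda t, n: n >= 2),
--     ("regional-burst", lambda t, n: n >= 3),
--     ("transatlantic-escalation",
--      lambda t, n: "cisa" in t and ("cert-fr" in t or "bsi" in t or "eu-partner" in t)),
-- )
--
--
-- def _regional_escalation_badges(regional_sources: list[str]) -> list[str]: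
--     tags = [t for k in {_norm(s) for s in regional_sources} for t in _key_tags(k)]
--     n = tags.count("national")
--     t = set(tags)
--     return [name for name, rule in _BADGE_RULES if rule(t, n)]
-- ===== Notes on version B (the rewrite author's own statement) =====
-- stated objective: alternative
-- what changed: Replaces A's five separate any()/sum() scans plus append-then-sorted(set()) badge assembly with a classify/count/table design: each distinct normalized key is mapped to abstract tags, the tags are flattened into one list, and the badges are produced by filtering a declarative rule table already written in sorted output order (no sort, no badge set).
import Mathlib
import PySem

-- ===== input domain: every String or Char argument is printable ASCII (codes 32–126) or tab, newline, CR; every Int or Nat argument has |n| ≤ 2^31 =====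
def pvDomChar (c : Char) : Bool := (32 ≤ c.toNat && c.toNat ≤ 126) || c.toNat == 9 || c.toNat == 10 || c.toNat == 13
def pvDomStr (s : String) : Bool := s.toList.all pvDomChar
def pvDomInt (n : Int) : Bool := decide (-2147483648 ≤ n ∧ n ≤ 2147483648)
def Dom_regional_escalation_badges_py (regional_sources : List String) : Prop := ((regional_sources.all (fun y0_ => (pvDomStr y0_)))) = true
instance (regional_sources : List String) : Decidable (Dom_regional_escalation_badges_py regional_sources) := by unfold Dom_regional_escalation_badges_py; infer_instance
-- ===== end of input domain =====

-- B replaces A's flag-scans-then-append-then-sort with a classify/count/table design: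
-- each distinct key is mapped to abstract tags, and the badges come from filtering a
-- rule table already written in sorted order (objective: alternative, same cost).

-- ===== PORT A =====
-- shared module-level context (VENDOR_SOURCES, _norm, _is_national_source)
def pvVendorSources : PySem.Set String :=
  ["msrc", "red hat security data api", "debian security tracker",
   "ubuntu security notices", "suse security advisories",
   "oracle critical patch update", "cisco security advisories",
   "palo alto networks security advisories", "fortinet psirt advisories",
   "vmware/broadcom security advisories", "apple security updates",
   "google android security bulletins"]

def pvKeywords : List String :=
  ["cisa", "cert-fr", "bsi", "cert-bund", "jvn", "ncsc", "govcert", "hkcert",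
   "cert-eu", "cert/cc"]

def pvNorm (value : String) : String :=
  let v := if value == "" then "" else value   -- 'value or ""' on a str
  PySem.Str.join " " (PySem.Str.split₀ (PySem.Str.lower (PySem.Str.strip v)))

def pvIsNational (source : String) : Bool :=
  let s := pvNorm source
  if PySem.Set.contains pvVendorSources s then false
  else pvKeywords.any (fun k => PySem.Str.isIn k s)

def regional_escalation_badges_py (regional_sources : List String) : List String :=
  let normalized : PySem.Dict String String :=
    regional_sources.foldl (fun d s => d.insert (pvNorm s) s) PySem.Dict.empty
  let keys : PySem.Set String := PySem.Set.ofList normalized.keys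
  let cisa := keys.any (fun k => PySem.Str.isIn "cisa" k)
  let cert_fr := keys.any (fun k => PySem.Str.isIn "cert-fr" k)
  let bsi := keys.any (fun k => PySem.Str.isIn "bsi" k || PySem.Str.isIn "cert-bund" k)
  let eu := cert_fr || bsi || keys.any (fun k => PySem.Str.isIn "cert-eu" k || PySem.Str.isIn "ncsc" k)
  let national_count := keys.foldl (fun acc k => if pvIsNational k then acc + 1 else acc) (0 : Int)
  let badges : List String := []
  let badges := if national_count ≥ 2 then badges ++ ["multi-national-corroboration"] else badges
  let badges := if national_count ≥ 3 then badges ++ ["regional-burst"] else badges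
  let badges := if cisa && eu then badges ++ ["transatlantic-escalation"] else badges
  let badges := if cisa && cert_fr then badges ++ ["CISA+CERT-FR"] else badges
  let badges := if cisa && bsi then badges ++ ["CISA+BSI"] else badges
  let badges := if cert_fr && bsi then badges ++ ["CERT-FR+BSI"] else badges
  PySem.List.sorted (PySem.Set.ofList badges) (fun x => x) false

-- ===== PORT B =====
-- _key_tags: the tag list is built by consecutive conditional appends
def pvKeyTags (k : String) : List String :=
  (if PySem.Str.isIn "cisa" k then ["cisa"] else []) ++
  (if PySem.Str.isIn "cert-fr" k then ["cert-fr"] else []) ++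
  (if PySem.Str.isIn "bsi" k || PySem.Str.isIn "cert-bund" k then ["bsi"] else []) ++
  (if PySem.Str.isIn "cert-eu" k || PySem.Str.isIn "ncsc" k then ["eu-partner"] else []) ++
  (if pvIsNational k then ["national"] else [])

-- _BADGE_RULES: (name, predicate over tag set and national count), in sorted output order
def pvBadgeRules : List (String × (PySem.Set String → Int → Bool)) :=
  [("CERT-FR+BSI", fun t _ => PySem.Set.contains t "cert-fr" && PySem.Set.contains t "bsi"),
   ("CISA+BSI", fun t _ => PySem.Set.contains t "cisa" && PySem.Set.contains t "bsi"),
   ("CISA+CERT-FR", fun t _ => PySem.Set.contains t "cisa" && PySem.Set.contains t "cert-fr"),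
   ("multi-national-corroboration", fun _ n => decide (n ≥ 2)),
   ("regional-burst", fun _ n => decide (n ≥ 3)),
   ("transatlantic-escalation", fun t _ =>
     PySem.Set.contains t "cisa" &&
       (PySem.Set.contains t "cert-fr" || PySem.Set.contains t "bsi" ||
        PySem.Set.contains t "eu-partner"))]

def regional_escalation_badges_py_alt (regional_sources : List String) : List String :=
  let tags := (PySem.Set.ofList (regional_sources.map pvNorm)).flatMap pvKeyTags
  let n : Int := (tags.count "national" : Int)
  let t : PySem.Set String := PySem.Set.ofList tags
  (pvBadgeRules.filter (fun p => p.2 t n)).map (fun p => p.1)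

-- ===== PRECONDITION & SPEC =====
def Spec_regional_escalation_badges_py (regional_sources : List String) (out : List String) : Prop := out = regional_escalation_badges_py_alt regional_sources
instance (regional_sources : List String) (out : List String) : Decidable (Spec_regional_escalation_badges_py regional_sources out) := by unfold Spec_regional_escalation_badges_py; infer_instance

-- ===== CLAIM (what is proved, stated in full; the proofs are below) =====
def Claim_equal_regional_escalation_badges_py : Prop := ∀ (regional_sources : List String), Dom_regional_escalation_badges_py regional_sources → Spec_regional_escalation_badges_py regional_sources (regional_escalation_badges_py regional_sources)

-- ===== LEMMAS AND PROOFS =====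

-- a tag sits in the flattened tag list of K iff some key of K satisfies its test
theorem pvContains_tags (K : List String) (tag : String) (P : String → Bool)
    (h : ∀ k, tag ∈ pvKeyTags k ↔ P k = true) :
    PySem.Set.contains (PySem.Set.ofList (K.flatMap pvKeyTags)) tag = K.any P := by
  have hmem : (tag ∈ K.flatMap pvKeyTags) ↔ (K.any P = true) := by
    simp [List.mem_flatMap, List.any_eq_true, h]
  simp only [PySem.Set.contains_eq_listContains, List.contains_eq_mem,
    PySem.Set.mem_ofList, hmem]
  exact Bool.decide_coe _

theorem pvTags_cisa (k : String) : "cisa" ∈ pvKeyTags k ↔ PySem.Str.isIn "cisa" k = true := by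
  unfold pvKeyTags
  split_ifs <;>
    simp_all only [List.mem_append, List.mem_cons, List.not_mem_nil, String.reduceEq,
      or_false, or_self, false_or, or_true, true_or, false_iff, true_iff, iff_true, iff_false,
      Bool.not_eq_true, iff_self]

theorem pvTags_fr (k : String) : "cert-fr" ∈ pvKeyTags k ↔ PySem.Str.isIn "cert-fr" k = true := by
  unfold pvKeyTags
  split_ifs <;>
    simp_all only [List.mem_append, List.mem_cons, List.not_mem_nil, String.reduceEq,
      or_false, or_self, false_or, or_true, true_or, false_iff, true_iff, iff_true, iff_false,
      Bool.not_eq_true, iff_self]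

theorem pvTags_bsi (k : String) :
    "bsi" ∈ pvKeyTags k ↔ (PySem.Str.isIn "bsi" k || PySem.Str.isIn "cert-bund" k) = true := by
  unfold pvKeyTags
  split_ifs <;>
    simp_all only [List.mem_append, List.mem_cons, List.not_mem_nil, String.reduceEq,
      or_false, or_self, false_or, or_true, true_or, false_iff, true_iff, iff_true, iff_false,
      Bool.not_eq_true, iff_self]

theorem pvTags_eu (k : String) :
    "eu-partner" ∈ pvKeyTags k ↔ (PySem.Str.isIn "cert-eu" k || PySem.Str.isIn "ncsc" k) = true := by
  unfold pvKeyTags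
  split_ifs <;>
    simp_all only [List.mem_append, List.mem_cons, List.not_mem_nil, String.reduceEq,
      or_false, or_self, false_or, or_true, true_or, false_iff, true_iff, iff_true, iff_false,
      Bool.not_eq_true, iff_self]

-- "national" occurs once per national key, so counting it counts the national keys
theorem pvCount_tags (K : List String) :
    (K.flatMap pvKeyTags).count "national" = K.countP pvIsNational := by
  induction K with
  | nil => simp
  | cons k K ih =>
    simp only [List.flatMap_cons, List.count_append, List.countP_cons, ih]
    have h1 : (pvKeyTags k).count "national" = if pvIsNational k then 1 else 0 := by
      unfold pvKeyTags
      split_ifs <;>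
        simp_all only [List.count_append, List.count_cons, List.count_nil, String.reduceEq,
          if_true, if_false, Nat.add_zero, Nat.zero_add, Bool.not_eq_true, cond_true, cond_false]
      all_goals rfl
    omega

-- A's running +1 fold over the keys is that same count
theorem pvFold_count (K : List String) :
    K.foldl (fun acc k => if pvIsNational k then acc + 1 else acc) (0 : Int) =
      (K.countP pvIsNational : Int) := by
  rw [PySem.List.foldl_count_if pvIsNational K 0]
  simp

-- filtering the rule table is the concatenation of its six conditional entries
theorem pvRules_eq (t : PySem.Set String) (n : Int) :
    (pvBadgeRules.filter (fun p => p.2 t n)).map (fun p => p.1) =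
    (if PySem.Set.contains t "cert-fr" && PySem.Set.contains t "bsi" then ["CERT-FR+BSI"] else []) ++
    (if PySem.Set.contains t "cisa" && PySem.Set.contains t "bsi" then ["CISA+BSI"] else []) ++
    (if PySem.Set.contains t "cisa" && PySem.Set.contains t "cert-fr" then ["CISA+CERT-FR"] else []) ++
    (if decide (n ≥ 2) then ["multi-national-corroboration"] else []) ++
    (if decide (n ≥ 3) then ["regional-burst"] else []) ++
    (if PySem.Set.contains t "cisa" &&
        (PySem.Set.contains t "cert-fr" || PySem.Set.contains t "bsi" ||
         PySem.Set.contains t "eu-partner") then ["transatlantic-escalation"] else []) := by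
  simp only [pvBadgeRules, List.filter_cons, List.filter_nil]
  split_ifs <;> simp_all

-- both badge constructions agree for every flag combination and count
theorem pvTable (c f b e : Bool) (n : Int) :
    (let eu := f || b || e
     let badges : List String := []
     let badges := if n ≥ 2 then badges ++ ["multi-national-corroboration"] else badges
     let badges := if n ≥ 3 then badges ++ ["regional-burst"] else badges
     let badges := if c && eu then badges ++ ["transatlantic-escalation"] else badges
     let badges := if c && f then badges ++ ["CISA+CERT-FR"] else badges
     let badges := if c && b then badges ++ ["CISA+BSI"] else badges
     let badges := if f && b then badges ++ ["CERT-FR+BSI"] else badges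
     PySem.List.sorted (PySem.Set.ofList badges) (fun x => x) false) =
    (if f && b then ["CERT-FR+BSI"] else []) ++
    (if c && b then ["CISA+BSI"] else []) ++
    (if c && f then ["CISA+CERT-FR"] else []) ++
    (if decide (n ≥ 2) then ["multi-national-corroboration"] else []) ++
    (if decide (n ≥ 3) then ["regional-burst"] else []) ++
    (if c && (f || b || e) then ["transatlantic-escalation"] else []) := by
  by_cases h2 : n ≥ 2 <;> by_cases h3 : n ≥ 3 <;>
    cases c <;> cases f <;> cases b <;> cases e <;> simp [h2, h3] <;>
    exact PySem.List.sorted_id_eq_of_perm_of_pairwise _ _ (by decide)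
      (by simp [List.pairwise_cons, String.le_iff_toList_le] <;> decide)

-- ===== VERDICT (by name: the statement is the Claim_ definition above) =====
theorem regional_escalation_badges_py_spec : Claim_equal_regional_escalation_badges_py := by
  intro rs _
  show regional_escalation_badges_py rs = regional_escalation_badges_py_alt rs
  have hk0 : (PySem.Dict.empty : PySem.Dict String String).keys = [] := rfl
  simp only [regional_escalation_badges_py, regional_escalation_badges_py_alt, hk0,
    PySem.Dict.keys_foldl_insert_key, PySem.Set.update_nil_left, PySem.Set.ofList_ofList,
    pvRules_eq, pvFold_count,
    pvContains_tags _ "cisa" _ pvTags_cisa,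
    pvContains_tags _ "cert-fr" _ pvTags_fr,
    pvContains_tags _ "bsi" _ pvTags_bsi,
    pvContains_tags _ "eu-partner" _ pvTags_eu,
    pvCount_tags]
  exact pvTable _ _ _ _ _
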